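-- pv_equiv track=rewrite | github.com/Uwater1/display | spilt.py | group_by_trading_days
-- ===== SOURCE A (Python) =====
-- from typing import List, Tuple
--
-- TRADING_DAY_START = "T09:30:00"  # Trading day starts at 9:30 AM ET
--
-- def is_trading_day_start(line: str) -> bool:
--     """
--     Check if a line represents the start of a trading day (9:30 AM).
--
--     Args:
--         line: A CSV data line
--
--     Returns:
--         True if the line starts at 9:30 AM, False otherwise
--     """
--     stripped = line.strip()
--     if not stripped:
--         return False
--
--     # First field is the timestamp
--     first_field = stripped.split(',')[0]
--
--     # Check if it contains T09:30:00 (9:30 AM start)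
--     # Format: 2024-02-12T09:30:00-05:00
--     return TRADING_DAY_START in first_field
--
-- def group_by_trading_days(lines: List[str]) -> List[List[str]]:
--     """
--     Group data lines by trading day based on 9:30 AM start times.
--
--     Args:
--         lines: List of data lines from CSV
--
--     Returns:
--         List of trading days, where each trading day is a list of its rows
--     """
--     trading_days = []
--     current_day = []
--
--     for line in lines:
--         stripped = line.strip()
--         if not stripped or stripped.startswith('#'):
--             continue
--
--         if is_trading_day_start(line):
--             # Start of a new trading day
--             if current_day:
--                 trading_days.append(current_day)
--             current_day = [line]
--         else:
--             current_day.append(line)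
--
--     # Don't forget the last trading day
--     if current_day:
--         trading_days.append(current_day)
--
--     return trading_days
-- ===== SOURCE B (Python) =====
-- from typing import List
--
-- TRADING_DAY_START = "T09:30:00"  # Trading day starts at 9:30 AM ET
--
-- def is_trading_day_start(line: str) -> bool:
--     stripped = line.strip()
--     if not stripped:
--         return False
--     first_field = stripped.split(',')[0]
--     return TRADING_DAY_START in first_field
--
-- def group_by_trading_days(lines: List[str]) -> List[List[str]]:
--     # First drop comment/blank lines, then cut the kept lines into maximal
--     # segments: each segment starts at a position i (the very first kept line,
--     # or a 9:30 marker) and runs up to, but not including, the next marker.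
--     kept = [l for l in lines if l.strip() and not l.strip().startswith('#')]
--     n = len(kept)
--     groups = []
--     i = 0
--     while i < n:
--         j = i + 1
--         while j < n and not is_trading_day_start(kept[j]):
--             j += 1
--         groups.append(kept[i:j])
--         i = j
--     return groups
-- ===== Notes on version B (the rewrite author's own statement) =====
-- stated objective: alternative
-- what changed: A threads a (trading_days, current_day) accumulator pair through one loop with a final flush; B first filters out blank/comment lines and then slices the kept list into segments by scanning forward from each segment start to the next 9:30 marker (no accumulator, no flush).
import Mathlib
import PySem

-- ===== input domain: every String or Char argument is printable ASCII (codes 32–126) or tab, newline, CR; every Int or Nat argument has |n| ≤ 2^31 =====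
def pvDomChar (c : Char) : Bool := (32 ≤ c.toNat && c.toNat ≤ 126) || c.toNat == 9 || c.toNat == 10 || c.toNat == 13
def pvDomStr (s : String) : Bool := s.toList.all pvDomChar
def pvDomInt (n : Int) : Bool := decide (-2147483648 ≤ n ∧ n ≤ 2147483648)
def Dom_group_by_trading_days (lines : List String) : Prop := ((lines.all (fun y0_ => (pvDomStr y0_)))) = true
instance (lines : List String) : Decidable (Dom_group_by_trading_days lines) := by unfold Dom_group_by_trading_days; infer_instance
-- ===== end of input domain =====

-- B replaces A's accumulator-pair loop (current_day + final flush) by a filter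
-- followed by slicing the kept lines into segments at the 9:30 markers (alternative decomposition).


-- ===== PORT A =====
-- shared module helper (used verbatim by both Pythons)
def is_trading_day_start (line : String) : Bool :=
  let stripped := PySem.Str.strip line
  if stripped = "" then false
  else
    -- stripped.split(',')[0]: split with a nonempty separator always yields ≥ 1 piece, so headD "" is exact
    -- split? with sep "," is always some and yields ≥ 1 piece, so getD/headD are exact
    let first_field := ((PySem.Str.split? stripped ",").getD []).headD ""
    PySem.Str.isIn "T09:30:00" first_field

def group_by_trading_days (lines : List String) : List (List String) :=
  let r := lines.foldl (fun (st : List (List String) × List String) line =>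
    let trading_days := st.1
    let current_day := st.2
    let stripped := PySem.Str.strip line
    if stripped = "" || PySem.Str.startswith stripped "#" then
      (trading_days, current_day)
    else if is_trading_day_start line then
      ((if current_day ≠ [] then trading_days ++ [current_day] else trading_days), [line])
    else
      (trading_days, current_day ++ [line])) ([], [])
  if r.2 ≠ [] then r.1 ++ [r.2] else r.1

-- ===== PORT B =====
-- B's inner while loop: scan forward from a segment start to the next marker,
-- emit the slice, continue from there.
def altGroups : List String → List (List String)
  | [] => []
  | x :: rest =>
    (x :: rest.takeWhile (fun l => !is_trading_day_start l)) ::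
      altGroups (rest.dropWhile (fun l => !is_trading_day_start l))
termination_by xs => xs.length
decreasing_by
  simpa using Nat.lt_succ_of_le (List.length_dropWhile_le _ _)

def group_by_trading_days_alt (lines : List String) : List (List String) :=
  let kept := lines.filter (fun l =>
    let s := PySem.Str.strip l
    !(s = "" || PySem.Str.startswith s "#"))
  altGroups kept

-- ===== PRECONDITION & SPEC =====
def Spec_group_by_trading_days (lines : List String) (out : List (List String)) : Prop := out = group_by_trading_days_alt lines
instance (lines : List String) (out : List (List String)) : Decidable (Spec_group_by_trading_days lines out) := by unfold Spec_group_by_trading_days; infer_instance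

-- ===== CLAIM (what is proved, stated in full; the proofs are below) =====
def Claim_equal_group_by_trading_days : Prop := ∀ (lines : List String), Dom_group_by_trading_days lines → Spec_group_by_trading_days lines (group_by_trading_days lines)

-- ===== LEMMAS AND PROOFS =====

-- the keep-predicate of A's 'continue' branch (= B's filter predicate)
def pvKeep (l : String) : Bool :=
  let s := PySem.Str.strip l
  !(s = "" || PySem.Str.startswith s "#")

-- A's loop body in the non-skipped case
def pvStep (st : List (List String) × List String) (line : String) :
    List (List String) × List String :=
  if is_trading_day_start line then
    ((if st.2 ≠ [] then st.1 ++ [st.2] else st.1), [line])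
  else
    (st.1, st.2 ++ [line])

-- closed description of 'run A's loop from (td, cd) then flush'
def pvG : List String → List String → List (List String)
  | cd, [] => if cd = [] then [] else [cd]
  | cd, x :: xs =>
    if is_trading_day_start x then (if cd = [] then [] else [cd]) ++ pvG [x] xs
    else pvG (cd ++ [x]) xs

-- a fold whose body skips non-p elements is a fold over the filtered list
lemma pvFoldl_if_filter {α β : Type} (p : α → Bool) (g : β → α → β) :
    ∀ (ls : List α) (st : β),
      ls.foldl (fun st l => if p l then g st l else st) st
        = (ls.filter p).foldl g st := by
  intro ls
  induction ls with
  | nil => intro st; rfl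
  | cons l ls ih =>
    intro st
    by_cases h : p l = true <;> simp [h, ih]

lemma pvStepA_eq (st : List (List String) × List String) (line : String) :
    (let trading_days := st.1
     let current_day := st.2
     let stripped := PySem.Str.strip line
     if stripped = "" || PySem.Str.startswith stripped "#" then
       (trading_days, current_day)
     else if is_trading_day_start line then
       ((if current_day ≠ [] then trading_days ++ [current_day] else trading_days), [line])
     else
       (trading_days, current_day ++ [line]))
    = if pvKeep line then pvStep st line else st := by
  unfold pvKeep pvStep
  by_cases h1 : PySem.Str.strip line = "" <;>
  by_cases h2 : PySem.Chars.startswith (PySem.Chars.strip line.toList) ['#'] = true <;>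
    simp [h1, h2]

lemma pvFold_G (kept : List String) (td : List (List String)) (cd : List String) :
    (let r := kept.foldl pvStep (td, cd)
     if r.2 ≠ [] then r.1 ++ [r.2] else r.1) = td ++ pvG cd kept := by
  induction kept generalizing td cd with
  | nil =>
    by_cases h : cd = [] <;> simp [pvG, h]
  | cons x xs ih =>
    simp only [List.foldl_cons, pvStep, pvG]
    by_cases hs : is_trading_day_start x = true
    · by_cases hc : cd = [] <;>
        simp [hs, hc, ih, List.append_assoc]
    · simp [hs, ih]

lemma pvG_ne (xs : List String) : ∀ cd : List String, cd ≠ [] →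
    pvG cd xs = (cd ++ xs.takeWhile (fun l => !is_trading_day_start l)) ::
      altGroups (xs.dropWhile (fun l => !is_trading_day_start l)) := by
  induction xs with
  | nil => intro cd hcd; simp [pvG, hcd, altGroups]
  | cons x xs ih =>
    intro cd hcd
    by_cases hs : is_trading_day_start x = true
    · rw [pvG]
      simp only [hs, if_pos, hcd]
      rw [ih [x] (by simp)]
      simp [hcd, hs, altGroups]
    · rw [pvG]
      simp only [hs]
      rw [if_neg (by simp [hs]), ih (cd ++ [x]) (by simp)]
      simp [hs, List.append_assoc]

lemma pvG_nil_eq (xs : List String) : pvG [] xs = altGroups xs := by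
  cases xs with
  | nil => simp [pvG, altGroups]
  | cons x xs =>
    have h : pvG [] (x :: xs) = pvG [x] xs := by
      by_cases hs : is_trading_day_start x = true <;> simp [pvG, hs]
    rw [h, pvG_ne xs [x] (by simp), altGroups]
    simp

-- ===== VERDICT (by name: the statement is the Claim_ definition above) =====
theorem group_by_trading_days_spec : Claim_equal_group_by_trading_days := by
  intro lines _
  unfold Spec_group_by_trading_days group_by_trading_days group_by_trading_days_alt
  have hbody : (fun (st : List (List String) × List String) line =>
      let trading_days := st.1
      let current_day := st.2
      let stripped := PySem.Str.strip line
      if stripped = "" || PySem.Str.startswith stripped "#" then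
        (trading_days, current_day)
      else if is_trading_day_start line then
        ((if current_day ≠ [] then trading_days ++ [current_day] else trading_days), [line])
      else
        (trading_days, current_day ++ [line]))
      = (fun st line => if pvKeep line then pvStep st line else st) := by
    funext st line; exact pvStepA_eq st line
  rw [hbody, pvFoldl_if_filter]
  have := pvFold_G (lines.filter pvKeep) [] []
  simp only [List.nil_append] at this
  rw [this, pvG_nil_eq]
  have hk : (fun l => let s := PySem.Str.strip l
                      !(s = "" || PySem.Str.startswith s "#")) = pvKeep := rfl
  rw [hk]
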